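-- pv_equiv track=rewrite | github.com/sarikiras/matrice-word-searches | diagonale.py | diagonales_GD
-- ===== SOURCE A (Python) =====
-- def grid_inf(grid, n):                      # good!
--     liste = []
--     for k in range(1, n):
--         ligne = []
--         for j in range(n-k):
--             ligne.append(grid[j+k][j])
--         liste.append(ligne)
--     return liste
--
-- def grid_sup(grid, n):              # very good!
--     liste = []
--     for k in range(1, n):
--         ligne = []
--         for i in range(n-k):
--             ligne.append(grid[i][i+k])
--         liste.append(ligne)
--     return liste
--
-- def diagonales_GD(grid):            # excellent!
--
--     n = len(grid)
--     p = len(grid[0])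
--     d = abs(n-p)
--
--     liste = [[grid[i][i] for i in range(min(n, p))]]
--
--     # je crée la liste des diagonales, cas où n ≤= p
--
--     if len(grid) < len(grid[0]):
--
--         # je crée la liste des diagonales inférieures
--         # similaire au cas où n=p
--
--         liste += grid_inf(grid, n)
--
--         # je crée la liste des diagonales supérieures dans ce cas
--
--         # d'abord la bande centrale
--         for k in range(1, d+1):
--             ligne = []
--             for i in range(n):
--                 ligne.append(grid[i][i+k])
--             liste.append(ligne)
--
--         # puis les diagonales supérieures
--         new_grid = list(range(n))
--         for i in range(n):
--             new_grid[i] = grid[i][d:]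
--
--         liste += grid_sup(new_grid, n)
--
--         return liste
--
--     if len(grid) >= len(grid[0]):                # n > p
--
--         # je crée la liste des diagonales supérieures dans ce cas
--         # même cas que n = p
--
--         liste += grid_sup(grid, p)
--
--         # je crée la liste des diagonales inférieures
--         # d'abord la bande centrale
--         for k in range(1, d+1):
--             ligne = []
--             for j in range(p):
--                 ligne.append(grid[j+k][j])
--             liste.append(ligne)
--
--         # puis je rajoute les diagonales inférieures
--         new_grid = list(range(p))
--         for i in range(p):
--             new_grid[i] = grid[i+d]
--         liste += grid_inf(new_grid, n)
--
--         return liste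
-- ===== SOURCE B (Python) =====
-- def diagonales_GD(grid):
--     n = len(grid)
--     p = len(grid[0])
--     if n < p:
--         offsets = [0] + [-k for k in range(1, n)] + list(range(1, p))
--     else:
--         offsets = [0] + list(range(1, p)) + [-k for k in range(1, n)]
--     return [[grid[i][i + o] for i in range(max(0, -o), min(n, p - o))]
--             for o in offsets]
-- ===== Notes on version B (the rewrite author's own statement) =====
-- stated objective: simpler
-- what changed: Replaces A's five specialized loops (main diagonal, grid_inf, grid_sup, a central band, and a re-sliced copy new_grid of the matrix) by one uniform rule: list the diagonal offsets in A's order and read each diagonal directly as grid[i][i+o] for i in [max(0,-o), min(n,p-o)), with no intermediate matrices.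
-- intended difference: On the single degenerate grid [[]] (one empty row) A returns [[], []] because its central-band loop fabricates d=1 extra empty diagonal, while B returns [[]] (just the one empty main diagonal), which is the intended list of diagonals of a 1x0 matrix. — e.g. on diagonales_GD([[]]): A returns [[], []], B returns [[]]
import Mathlib
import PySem

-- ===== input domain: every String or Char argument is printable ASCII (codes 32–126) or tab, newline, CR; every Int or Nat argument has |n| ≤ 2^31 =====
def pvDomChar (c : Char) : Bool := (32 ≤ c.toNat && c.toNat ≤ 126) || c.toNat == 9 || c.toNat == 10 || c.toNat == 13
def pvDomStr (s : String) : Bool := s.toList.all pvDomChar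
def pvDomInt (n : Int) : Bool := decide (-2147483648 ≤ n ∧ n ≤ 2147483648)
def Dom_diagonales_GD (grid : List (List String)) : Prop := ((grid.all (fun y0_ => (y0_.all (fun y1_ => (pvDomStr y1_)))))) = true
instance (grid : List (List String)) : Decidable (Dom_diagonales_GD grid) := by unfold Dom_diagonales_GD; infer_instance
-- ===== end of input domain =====

-- B is a single uniform offset-indexed reading of the diagonals instead of A's five
-- specialized loops and sliced copy; return-value equivalence only (neither mutates).

-- ===== PORT A =====
-- grid[i][j] with the in-range accesses A makes on admitted inputs (Pre_ excludes A's IndexErrors)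
def pvAt (grid : List (List String)) (i j : Nat) : String := (grid.getD i []).getD j ""

def pvGridInf (grid : List (List String)) (n : Nat) : List (List String) :=
  (List.range' 1 (n - 1)).map (fun k =>
    (List.range (n - k)).map (fun j => pvAt grid (j + k) j))

def pvGridSup (grid : List (List String)) (n : Nat) : List (List String) :=
  (List.range' 1 (n - 1)).map (fun k =>
    (List.range (n - k)).map (fun i => pvAt grid i (i + k)))

def diagonales_GD (grid : List (List String)) : List (List String) :=
  let n := grid.length
  let p := (grid.getD 0 []).length
  let d := ((n : Int) - (p : Int)).natAbs
  let liste := [(List.range (min n p)).map (fun i => pvAt grid i i)]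
  if n < p then
    ((liste ++ pvGridInf grid n)
      ++ (List.range' 1 d).map (fun k => (List.range n).map (fun i => pvAt grid i (i + k))))
      ++ pvGridSup ((List.range n).map (fun i => (grid.getD i []).drop d)) n
  else
    ((liste ++ pvGridSup grid p)
      ++ (List.range' 1 d).map (fun k => (List.range p).map (fun j => pvAt grid (j + k) j)))
      ++ pvGridInf ((List.range p).map (fun i => grid.getD (i + d) [])) n

-- ===== PORT B =====
-- the inner comprehension of Source B: the diagonal at offset o
def pvDiag (grid : List (List String)) (n p : Nat) (o : Int) : List String :=
  (PySem.List.pyRange (max 0 (-o)) (min (n : Int) ((p : Int) - o)) 1).map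
    (fun i => (grid.getD i.toNat []).getD (i + o).toNat "")

def diagonales_GD_alt (grid : List (List String)) : List (List String) :=
  let n := grid.length
  let p := (grid.getD 0 []).length
  let offsets : List Int :=
    if n < p then
      [0] ++ (List.range' 1 (n - 1)).map (fun k : Nat => -(k : Int))
          ++ (List.range' 1 (p - 1)).map (fun k : Nat => (k : Int))
    else
      [0] ++ (List.range' 1 (p - 1)).map (fun k : Nat => (k : Int))
          ++ (List.range' 1 (n - 1)).map (fun k : Nat => -(k : Int))
  offsets.map (pvDiag grid n p)

-- ===== PRECONDITION & SPEC =====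
-- Pre_ = exactly the inputs where Python A returns: nonempty, every row at least p = len(grid[0])
-- long, and n ≤ p (A's final grid_inf over-indexes when n > p) — except the degenerate [[]],
-- on which A also returns (see D_ below).
def Pre_diagonales_GD (grid : List (List String)) : Prop :=
  grid ≠ [] ∧ (grid.length ≤ (grid.getD 0 []).length ∨ grid = [[]]) ∧
    ∀ row ∈ grid, (grid.getD 0 []).length ≤ row.length
instance (grid : List (List String)) : Decidable (Pre_diagonales_GD grid) := by
  unfold Pre_diagonales_GD; infer_instance
def pvWitness_diagonales_GD : List (List String) := [["a", "b"], ["c", "d"]]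

-- On the single degenerate grid [[]] A returns [[], []] (its central-band loop fabricates an
-- extra empty diagonal), while B returns [[]], the intended single empty main diagonal of a 1×0 matrix.
def D_diagonales_GD (grid : List (List String)) : Prop := grid = [[]]
instance (grid : List (List String)) : Decidable (D_diagonales_GD grid) := by
  unfold D_diagonales_GD; infer_instance
def Spec_diagonales_GD (grid : List (List String)) (out : List (List String)) : Prop :=
  ¬ D_diagonales_GD grid → out = diagonales_GD_alt grid
instance (grid : List (List String)) (out : List (List String)) : Decidable (Spec_diagonales_GD grid out) := by
  unfold Spec_diagonales_GD; infer_instance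
def pvDiffWitness_diagonales_GD : List (List String) := [[]]
def pvDiffWitnessOut_diagonales_GD : (List (List String)) × (List (List String)) := ([[], []], [[]])

-- ===== CLAIM (what is proved, stated in full; the proofs are below) =====
def Claim_unchanged_diagonales_GD : Prop := ∀ (grid : List (List String)), Dom_diagonales_GD grid → Pre_diagonales_GD grid → Spec_diagonales_GD grid (diagonales_GD grid)
def Claim_changed_diagonales_GD : Prop := Dom_diagonales_GD (pvDiffWitness_diagonales_GD) ∧ Pre_diagonales_GD (pvDiffWitness_diagonales_GD) ∧ D_diagonales_GD (pvDiffWitness_diagonales_GD) ∧ diagonales_GD (pvDiffWitness_diagonales_GD) = pvDiffWitnessOut_diagonales_GD.1 ∧ diagonales_GD_alt (pvDiffWitness_diagonales_GD) = pvDiffWitnessOut_diagonales_GD.2 ∧ pvDiffWitnessOut_diagonales_GD.1 ≠ pvDiffWitnessOut_diagonales_GD.2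
def Claim_exact_diagonales_GD : Prop := ∀ (grid : List (List String)), Dom_diagonales_GD grid → Pre_diagonales_GD grid → D_diagonales_GD grid → diagonales_GD grid ≠ diagonales_GD_alt grid
-- ===== LEMMAS AND PROOFS =====

lemma pvRange_natmap (a b : Nat) :
    PySem.List.pyRange (a : Int) (b : Int) 1
      = (List.range (b - a)).map (fun t => ((a + t : Nat) : Int)) := by
  rw [PySem.List.pyRange_one, show ((b : Int) - (a : Int)).toNat = b - a from by omega]
  exact List.map_congr_left (fun t _ => by push_cast; ring)

lemma pv_getD_map_range {α : Type} (f : Nat → α) (n i : Nat) (d : α) (h : i < n) :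
    ((List.range n).map f).getD i d = f i := by
  simp [List.getD_eq_getElem?_getD, h]

lemma pv_getD_drop {α : Type} (l : List α) (m j : Nat) (d : α) :
    (l.drop m).getD j d = l.getD (m + j) d := by
  simp [List.getD_eq_getElem?_getD, List.getElem?_drop]

lemma pvDiag_pos (grid : List (List String)) (n p k : Nat) (hk : k ≤ p) :
    pvDiag grid n p (k : Int)
      = (List.range (min n (p - k))).map (fun i => pvAt grid i (i + k)) := by
  unfold pvDiag
  rw [show max 0 (-((k : Nat) : Int)) = (((0 : Nat)) : Int) from by omega,
      show min ((n : Nat) : Int) (((p : Nat) : Int) - ((k : Nat) : Int))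
        = ((min n (p - k) : Nat) : Int) from by push_cast; omega,
      pvRange_natmap, List.map_map]
  apply List.map_congr_left
  intro t _
  simp only [Function.comp_def, pvAt, Nat.zero_add, Int.toNat_natCast,
    ← Nat.cast_add]

lemma pvDiag_zero (grid : List (List String)) (n p : Nat) :
    pvDiag grid n p 0 = (List.range (min n p)).map (fun i => pvAt grid i i) := by
  have h := pvDiag_pos grid n p 0 (Nat.zero_le p)
  simpa using h

lemma pvDiag_neg (grid : List (List String)) (n p k : Nat) (_hkn : k ≤ n) (hnp : n ≤ p) :
    pvDiag grid n p (-(k : Int))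
      = (List.range (n - k)).map (fun j => pvAt grid (j + k) j) := by
  unfold pvDiag
  rw [show max 0 (-(-((k : Nat) : Int))) = ((k : Nat) : Int) from by omega,
      show min ((n : Nat) : Int) (((p : Nat) : Int) - (-((k : Nat) : Int)))
        = ((n : Nat) : Int) from by omega,
      pvRange_natmap, List.map_map]
  apply List.map_congr_left
  intro t _
  simp only [Function.comp_def, pvAt, Int.toNat_natCast]
  rw [show (((k + t : Nat) : Int) + -((k : Nat) : Int)).toNat = t from by omega,
      Nat.add_comm k t]

-- ===== VERDICT (by name: the statement is the Claim_ definition above) =====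
theorem diagonales_GD_spec : Claim_unchanged_diagonales_GD := by
  intro grid _ hPre hnD
  obtain ⟨hne, hnpOr, -⟩ := hPre
  unfold D_diagonales_GD at hnD
  have hnp : grid.length ≤ (grid.getD 0 []).length := by
    rcases hnpOr with h | h
    · exact h
    · exact absurd h hnD
  have hn : 0 < grid.length := List.length_pos_of_ne_nil hne
  show diagonales_GD grid = diagonales_GD_alt grid
  simp only [diagonales_GD, diagonales_GD_alt]
  set n := grid.length with hn_def
  set p := (grid.getD 0 []).length with hp_def
  rw [show ((n : Int) - (p : Int)).natAbs = p - n from by omega]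
  have e0 : ([(0 : Int)]).map (pvDiag grid n p)
      = [(List.range (min n p)).map (fun i => pvAt grid i i)] := by
    simp [pvDiag_zero]
  have e1 : ((List.range' 1 (n - 1)).map (fun k => -((k : Nat) : Int))).map (pvDiag grid n p)
      = pvGridInf grid n := by
    unfold pvGridInf
    rw [List.map_map]
    apply List.map_congr_left
    intro k hk
    rw [List.mem_range'_1] at hk
    exact pvDiag_neg grid n p k (by omega) hnp
  by_cases hlt : n < p
  · rw [if_pos hlt, if_pos hlt]
    have e2 : ((List.range' 1 (p - 1)).map (fun k => ((k : Nat) : Int))).map (pvDiag grid n p)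
        = (List.range' 1 (p - n)).map
            (fun k => (List.range n).map (fun i => pvAt grid i (i + k)))
          ++ pvGridSup ((List.range n).map (fun i => (grid.getD i []).drop (p - n))) n := by
      rw [List.map_map, show p - 1 = (p - n) + (n - 1) from by omega, ← List.range'_append,
        List.map_append]
      congr 1
      · apply List.map_congr_left
        intro k hk
        rw [List.mem_range'_1] at hk
        rw [Function.comp_apply, pvDiag_pos grid n p k (by omega),
          show min n (p - k) = n from by omega]
      · unfold pvGridSup
        rw [List.range'_eq_map_range, List.range'_eq_map_range, List.map_map, List.map_map]
        apply List.map_congr_left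
        intro t ht
        rw [List.mem_range] at ht
        rw [Function.comp_apply, Function.comp_apply, Function.comp_apply,
          pvDiag_pos grid n p (1 + 1 * (p - n) + t) (by omega),
          show min n (p - (1 + 1 * (p - n) + t)) = n - (1 + t) from by omega]
        apply List.map_congr_left
        intro i hi
        rw [List.mem_range] at hi
        simp only [pvAt]
        rw [pv_getD_map_range _ n i [] (by omega), pv_getD_drop,
          show (p - n) + (i + (1 + t)) = i + (1 + 1 * (p - n) + t) from by omega]
    rw [List.map_append, List.map_append, e0, e1, e2]
    simp [List.append_assoc]
  · rw [if_neg hlt, if_neg hlt]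
    have hnep : n = p := le_antisymm hnp (le_of_not_gt hlt)
    have e2 : ((List.range' 1 (p - 1)).map (fun k => ((k : Nat) : Int))).map (pvDiag grid n p)
        = pvGridSup grid p := by
      unfold pvGridSup
      rw [List.map_map]
      apply List.map_congr_left
      intro k hk
      rw [List.mem_range'_1] at hk
      rw [Function.comp_apply, pvDiag_pos grid n p k (by omega),
        show min n (p - k) = p - k from by omega]
    have e3 : ((List.range' 1 (n - 1)).map (fun k => -((k : Nat) : Int))).map (pvDiag grid n p)
        = pvGridInf ((List.range p).map (fun i => grid.getD (i + (p - n)) [])) n := by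
      unfold pvGridInf
      rw [List.map_map]
      apply List.map_congr_left
      intro k hk
      rw [List.mem_range'_1] at hk
      rw [Function.comp_apply, pvDiag_neg grid n p k (by omega) hnp]
      apply List.map_congr_left
      intro j hj
      rw [List.mem_range] at hj
      simp only [pvAt]
      rw [pv_getD_map_range _ p (j + k) [] (by omega),
        show (j + k) + (p - n) = j + k from by omega]
    rw [List.map_append, List.map_append, e0, e2, e3,
      show p - n = 0 from by omega]
    simp

theorem diagonales_GD_changed : Claim_changed_diagonales_GD := by
  unfold Claim_changed_diagonales_GD; decide
theorem diagonales_GD_tight : Claim_exact_diagonales_GD := by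
  intro grid _ _ hD
  subst hD; decide
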